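-- pv_equiv track=rewrite | github.com/jsw7524/Leetcode | 6194. Minimize XOR/6194. Minimize XOR.py | ZerosToOnes
-- ===== SOURCE A (Python) =====
-- def ZerosToOnes(binstr, n):
--     tmp=list()
--
--     for c in binstr[::-1]:
--         if c == "0":
--             if n>0:
--                 tmp.append("1")
--                 n-=1
--             else:
--                 tmp.append("0")
--         else:
--             tmp.append("1")
--     for i in range(n):
--         tmp.append("1")
--     return  ''.join(tmp[::-1])
-- ===== SOURCE B (Python) =====
-- def ZerosToOnes(binstr, n):
--     z = binstr.count("0")
--     if n >= z:
--         return "1" * (len(binstr) + n - z)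
--     keep = z - n
--     seen = 0
--     out = []
--     for c in binstr:
--         if c == "0" and seen < keep:
--             out.append("0")
--             seen += 1
--         else:
--             out.append("1")
--     return "".join(out)
-- ===== Notes on version B (the rewrite author's own statement) =====
-- stated objective: simpler
-- what changed: Replaces A's reversed scan with a mutating budget plus a final second reversal by a count-then-forward decomposition: count the zeros once, return an all-ones string directly when n covers every zero, otherwise one forward pass keeping only the first z-n zeros.
import Mathlib
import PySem

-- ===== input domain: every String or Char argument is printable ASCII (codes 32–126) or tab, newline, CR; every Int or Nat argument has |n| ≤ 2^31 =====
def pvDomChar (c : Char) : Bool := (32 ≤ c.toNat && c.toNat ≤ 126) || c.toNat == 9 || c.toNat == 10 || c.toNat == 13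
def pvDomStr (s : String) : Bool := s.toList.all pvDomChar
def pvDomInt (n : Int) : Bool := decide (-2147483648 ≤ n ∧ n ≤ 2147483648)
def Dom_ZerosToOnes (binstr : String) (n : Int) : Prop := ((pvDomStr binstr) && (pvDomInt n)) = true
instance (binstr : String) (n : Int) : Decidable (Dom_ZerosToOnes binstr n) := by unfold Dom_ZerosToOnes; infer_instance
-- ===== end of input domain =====

-- B replaces A's reversed scan with a running budget (plus a second reversal at the end) by a
-- count-then-forward decomposition: count the zeros once, then either emit all ones directly or
-- keep the first z-n zeros in one forward pass (objective: simpler, no reversals).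

-- ===== PORT A =====
-- the 'for c in binstr[::-1]' loop: state is (tmp, n); binstr[::-1] is the reversed char list
def ZerosToOnesLoop : List Char → Int → List Char → List Char × Int
  | [], n, tmp => (tmp, n)
  | c :: rest, n, tmp =>
    if c = '0' then
      if n > 0 then ZerosToOnesLoop rest (n - 1) (tmp ++ ['1'])
      else ZerosToOnesLoop rest n (tmp ++ ['0'])
    else ZerosToOnesLoop rest n (tmp ++ ['1'])

def ZerosToOnes (binstr : String) (n : Int) : String :=
  let p := ZerosToOnesLoop binstr.toList.reverse n []
  -- for i in range(n): tmp.append("1");  return ''.join(tmp[::-1])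
  String.mk ((p.1 ++ (PySem.List.pyRange 0 p.2 1).map (fun _ => '1')).reverse)

-- ===== PORT B =====
-- the forward 'for c in binstr' loop of Source B: emit '0' only for the first `keep` zeros
def ZerosToOnesAltLoop : List Char → Int → Int → List Char
  | [], _, _ => []
  | c :: rest, keep, seen =>
    if c = '0' ∧ seen < keep then '0' :: ZerosToOnesAltLoop rest keep (seen + 1)
    else '1' :: ZerosToOnesAltLoop rest keep seen

def ZerosToOnes_alt (binstr : String) (n : Int) : String :=
  let z : Int := (PySem.Str.count binstr "0" : Int)
  if n ≥ z then String.mk (List.replicate ((binstr.toList.length : Int) + n - z).toNat '1')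
  else String.mk (ZerosToOnesAltLoop binstr.toList (z - n) 0)

-- ===== PRECONDITION & SPEC =====
def Spec_ZerosToOnes (binstr : String) (n : Int) (out : String) : Prop := out = ZerosToOnes_alt binstr n
instance (binstr : String) (n : Int) (out : String) : Decidable (Spec_ZerosToOnes binstr n out) := by unfold Spec_ZerosToOnes; infer_instance

-- ===== CLAIM (what is proved, stated in full; the proofs are below) =====
def Claim_equal_ZerosToOnes : Prop := ∀ (binstr : String) (n : Int), Dom_ZerosToOnes binstr n → Spec_ZerosToOnes binstr n (ZerosToOnes binstr n)

-- ===== LEMMAS AND PROOFS =====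

-- the list A's loop emits (without the accumulator)
def emitA : List Char → Int → List Char
  | [], _ => []
  | c :: rest, n =>
    if c = '0' then
      if n > 0 then '1' :: emitA rest (n - 1)
      else '0' :: emitA rest n
    else '1' :: emitA rest n

-- leftover budget of either loop (both decrement on the same condition)
def remAB : List Char → Int → Int
  | [], n => n
  | c :: rest, n => if c = '0' ∧ 0 < n then remAB rest (n - 1) else remAB rest n

-- B's loop with the counter folded into the budget k = keep - seen
def emitB : List Char → Int → List Char
  | [], _ => []
  | c :: rest, k => if c = '0' ∧ 0 < k then '0' :: emitB rest (k - 1) else '1' :: emitB rest k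

-- zero count as an Int
def Zc (l : List Char) : Int := (l.count '0' : Int)

lemma loopA_eq (l : List Char) : ∀ (n : Int) (tmp : List Char),
    ZerosToOnesLoop l n tmp = (tmp ++ emitA l n, remAB l n) := by
  induction l with
  | nil => intro n tmp; simp [ZerosToOnesLoop, emitA, remAB]
  | cons c rest ih =>
    intro n tmp
    by_cases h0 : c = '0'
    · by_cases hn : n > 0
      · simp [ZerosToOnesLoop, emitA, remAB, h0, hn, ih]
      · simp [ZerosToOnesLoop, emitA, remAB, h0, hn, ih]
    · simp [ZerosToOnesLoop, emitA, remAB, h0, ih]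

lemma loopB_eq (l : List Char) : ∀ (keep seen : Int),
    ZerosToOnesAltLoop l keep seen = emitB l (keep - seen) := by
  induction l with
  | nil => intro keep seen; simp [ZerosToOnesAltLoop, emitB]
  | cons c rest ih =>
    intro keep seen
    by_cases h : c = '0' ∧ seen < keep
    · have h' : c = '0' ∧ 0 < keep - seen := ⟨h.1, by omega⟩
      simp only [ZerosToOnesAltLoop, emitB, if_pos h, if_pos h', ih]
      have : keep - (seen + 1) = keep - seen - 1 := by omega
      rw [this]
    · have h' : ¬ (c = '0' ∧ 0 < keep - seen) := by
        intro hc; exact h ⟨hc.1, by omega⟩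
      simp only [ZerosToOnesAltLoop, emitB, if_neg h, if_neg h', ih]

lemma Zc_cons (c : Char) (l : List Char) :
    Zc (c :: l) = Zc l + (if c = '0' then 1 else 0) := by
  by_cases h : c = '0' <;> simp [Zc, h]

lemma Zc_nonneg (l : List Char) : 0 ≤ Zc l := by simp [Zc]

lemma Zc_reverse (l : List Char) : Zc l.reverse = Zc l := by simp [Zc]

lemma remAB_nonpos (l : List Char) : ∀ n : Int, n ≤ 0 → remAB l n = n := by
  induction l with
  | nil => intro n _; rfl
  | cons c rest ih =>
    intro n hn
    have h : ¬ (c = '0' ∧ 0 < n) := by intro h; omega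
    simp [remAB, if_neg h, ih n hn]

lemma remAB_le (l : List Char) : ∀ n : Int, n ≤ Zc l → remAB l n ≤ 0 := by
  induction l with
  | nil => intro n h; simp [Zc] at h; simpa [remAB] using h
  | cons c rest ih =>
    intro n h
    rw [Zc_cons] at h
    by_cases hc : c = '0' ∧ 0 < n
    · simp only [remAB, if_pos hc]
      exact ih (n - 1) (by simp [hc.1] at h; omega)
    · simp only [remAB, if_neg hc]
      by_cases hn : n ≤ 0
      · rw [remAB_nonpos rest n hn]; omega
      · have hc0 : c ≠ '0' := by intro he; exact hc ⟨he, by omega⟩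
        exact ih n (by simp [hc0] at h; omega)

lemma remAB_ge (l : List Char) : ∀ n : Int, Zc l ≤ n → remAB l n = n - Zc l := by
  induction l with
  | nil => intro n h; simp [remAB, Zc]
  | cons c rest ih =>
    intro n h
    rw [Zc_cons] at h ⊢
    have hr := Zc_nonneg rest
    by_cases hc0 : c = '0'
    · have hn : 0 < n := by simp [hc0] at h; omega
      have hp : c = '0' ∧ 0 < n := ⟨hc0, hn⟩
      simp only [remAB, if_pos hp]
      rw [ih (n - 1) (by simp [hc0] at h; omega)]
      simp [hc0]; omega
    · have hne : ¬ (c = '0' ∧ 0 < n) := by intro hh; exact hc0 hh.1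
      simp only [remAB, if_neg hne]
      rw [ih n (by simp [hc0] at h; omega)]
      simp [hc0]

lemma emitB_congr (l : List Char) : ∀ k1 k2 : Int, Zc l ≤ k1 → Zc l ≤ k2 → emitB l k1 = emitB l k2 := by
  induction l with
  | nil => intros; rfl
  | cons c rest ih =>
    intro k1 k2 h1 h2
    rw [Zc_cons] at h1 h2
    have hr := Zc_nonneg rest
    by_cases hc0 : c = '0'
    · simp [hc0] at h1 h2
      have p1 : c = '0' ∧ 0 < k1 := ⟨hc0, by omega⟩
      have p2 : c = '0' ∧ 0 < k2 := ⟨hc0, by omega⟩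
      simp only [emitB, if_pos p1, if_pos p2]
      rw [ih (k1 - 1) (k2 - 1) (by omega) (by omega)]
    · simp [hc0] at h1 h2
      have n1 : ¬ (c = '0' ∧ 0 < k1) := fun hh => hc0 hh.1
      have n2 : ¬ (c = '0' ∧ 0 < k2) := fun hh => hc0 hh.1
      simp only [emitB, if_neg n1, if_neg n2]
      rw [ih k1 k2 h1 h2]

lemma emitB_append (xs : List Char) : ∀ (ys : List Char) (k : Int),
    emitB (xs ++ ys) k = emitB xs k ++ emitB ys (remAB xs k) := by
  induction xs with
  | nil => intro ys k; simp [emitB, remAB]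
  | cons c rest ih =>
    intro ys k
    by_cases hc : c = '0' ∧ 0 < k
    · simp only [List.cons_append, emitB, remAB, if_pos hc, ih]
    · simp only [List.cons_append, emitB, remAB, if_neg hc, ih]

lemma emitA_reverse (l : List Char) : ∀ n : Int,
    (emitA l n).reverse = emitB l.reverse (Zc l - n) := by
  induction l with
  | nil => intro n; rfl
  | cons c rest ih =>
    intro n
    by_cases hc0 : c = '0'
    · subst hc0
      have hZ : Zc ('0' :: rest) = Zc rest + 1 := by rw [Zc_cons]; simp
      by_cases hn : n > 0
      · -- flipped zero: budget on the reversed side is already exhausted at this last position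
        have he : emitA ('0' :: rest) n = '1' :: emitA rest (n - 1) := by
          simp [emitA, hn]
        rw [he, List.reverse_cons, ih, hZ, List.reverse_cons, emitB_append]
        have hk' : Zc rest + 1 - n ≤ Zc rest.reverse := by rw [Zc_reverse]; omega
        have hrem : remAB rest.reverse (Zc rest + 1 - n) ≤ 0 := remAB_le _ _ hk'
        have hne : ¬ (('0' : Char) = '0' ∧ 0 < remAB rest.reverse (Zc rest + 1 - n)) := by
          intro hh; omega
        have hr0 : ¬ (0 < remAB rest.reverse (Zc rest + 1 - n)) := by omega
        have h1 : emitB ['0'] (remAB rest.reverse (Zc rest + 1 - n)) = ['1'] := by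
          simp [emitB, hr0]
        rw [h1]
        have : Zc rest - (n - 1) = Zc rest + 1 - n := by omega
        rw [this]
      · -- kept zero
        have he : emitA ('0' :: rest) n = '0' :: emitA rest n := by
          simp [emitA, hn]
        rw [he, List.reverse_cons, ih, hZ, List.reverse_cons, emitB_append]
        have hk' : Zc rest.reverse ≤ Zc rest + 1 - n := by rw [Zc_reverse]; omega
        have hrem : remAB rest.reverse (Zc rest + 1 - n) = Zc rest + 1 - n - Zc rest.reverse :=
          remAB_ge _ _ hk'
        have hpos : ('0' : Char) = '0' ∧ 0 < remAB rest.reverse (Zc rest + 1 - n) := by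
          refine ⟨rfl, ?_⟩
          rw [hrem, Zc_reverse]; omega
        have hr0 : 0 < remAB rest.reverse (Zc rest + 1 - n) := hpos.2
        have h1 : emitB ['0'] (remAB rest.reverse (Zc rest + 1 - n)) = ['0'] := by
          simp [emitB, hr0]
        rw [h1]
        congr 1
        exact emitB_congr _ _ _ (by rw [Zc_reverse]; omega) (by rw [Zc_reverse]; omega)
    · have hZ : Zc (c :: rest) = Zc rest := by rw [Zc_cons]; simp [hc0]
      have he : emitA (c :: rest) n = '1' :: emitA rest n := by simp [emitA, hc0]
      rw [he, List.reverse_cons, ih, hZ, List.reverse_cons, emitB_append]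
      have hne : ¬ (c = '0' ∧ 0 < remAB rest.reverse (Zc rest - n)) := fun hh => hc0 hh.1
      have h1 : emitB [c] (remAB rest.reverse (Zc rest - n)) = ['1'] := by
        simp [emitB, if_neg hne]
      rw [h1]

lemma emitA_all_ones (l : List Char) : ∀ n : Int, Zc l ≤ n → emitA l n = List.replicate l.length '1' := by
  induction l with
  | nil => intros; rfl
  | cons c rest ih =>
    intro n h
    rw [Zc_cons] at h
    have hr := Zc_nonneg rest
    by_cases hc0 : c = '0'
    · have hn : n > 0 := by simp [hc0] at h; omega
      simp only [emitA, if_pos hc0, if_pos hn, List.length_cons, List.replicate_succ]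
      rw [ih (n - 1) (by simp [hc0] at h; omega)]
    · simp only [emitA, if_neg hc0, List.length_cons, List.replicate_succ]
      rw [ih n (by simp [hc0] at h; omega)]

lemma count_go_one (l : List Char) : ∀ (fuel : Nat) (acc : Nat), l.length ≤ fuel →
    PySem.Chars.count.go ['0'] fuel l acc = acc + l.count '0' := by
  induction l with
  | nil => intro fuel acc _; cases fuel <;> simp [PySem.Chars.count.go]
  | cons c rest ih =>
    intro fuel acc hf
    cases fuel with
    | zero => simp at hf
    | succ f =>
      simp only [List.length_cons] at hf
      simp only [PySem.Chars.count.go]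
      by_cases hc : c = '0'
      · have hpre : List.isPrefixOf ['0'] (c :: rest) = true := by simp [List.isPrefixOf, hc]
        rw [if_pos hpre]
        have hrec := ih f (acc + 1) (by omega)
        simp only [List.length_singleton, List.drop_succ_cons, List.drop_zero]
        rw [hrec, List.count_cons]
        simp [hc]; omega
      · have hpre : ¬ List.isPrefixOf ['0'] (c :: rest) = true := by
          simp [List.isPrefixOf]
          intro hh
          exact absurd hh.symm hc
        rw [if_neg hpre]
        rw [ih f acc (by omega), List.count_cons]
        simp [hc]

lemma str_count_zero (s : String) : PySem.Str.count s "0" = s.toList.count '0' := by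
  simp only [PySem.Str.count, PySem.Chars.count]
  rw [if_neg (by decide)]
  have h0 : ("0".toList) = ['0'] := rfl
  rw [h0, count_go_one s.toList _ 0 (by simp)]
  omega

lemma pyRange_ones (m : Int) : (PySem.List.pyRange 0 m 1).map (fun _ => '1') = List.replicate m.toNat '1' := by
  rw [PySem.List.pyRange_one]
  simp [Function.comp_def, List.map_const', List.length_range]

-- ===== VERDICT (by name: the statement is the Claim_ definition above) =====
theorem ZerosToOnes_spec : Claim_equal_ZerosToOnes := by
  intro binstr n _
  unfold Spec_ZerosToOnes ZerosToOnes ZerosToOnes_alt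
  set cs := binstr.toList with hcs
  have hz : (PySem.Str.count binstr "0" : Int) = Zc cs := by
    rw [str_count_zero]; rfl
  rw [loopA_eq, hz]
  simp only [List.nil_append]
  by_cases hge : n ≥ Zc cs
  · rw [if_pos hge]
    have hzr : Zc cs.reverse ≤ n := by rw [Zc_reverse]; exact hge
    rw [emitA_all_ones cs.reverse n hzr, remAB_ge cs.reverse n hzr, Zc_reverse, pyRange_ones]
    congr 1
    rw [List.reverse_append, List.reverse_replicate, List.reverse_replicate,
      List.replicate_append_replicate, List.length_reverse]
    congr 1
    have h0 := Zc_nonneg cs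
    have h1 : cs.count '0' ≤ cs.length := List.count_le_length
    simp [Zc] at *
    omega
  · rw [if_neg hge]
    have hle : n ≤ Zc cs.reverse := by rw [Zc_reverse]; omega
    have hrem := remAB_le cs.reverse n hle
    have hempty : PySem.List.pyRange 0 (remAB cs.reverse n) 1 = [] := by
      rw [PySem.List.pyRange_one]
      have h0 : ((remAB cs.reverse n) - 0).toNat = 0 := by omega
      rw [h0]; rfl
    rw [hempty]
    simp only [List.map_nil, List.append_nil]
    rw [emitA_reverse, List.reverse_reverse, Zc_reverse, loopB_eq]
    norm_num
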